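-- pv_equiv track=rewrite | github.com/mlindsey23/MIRDCalculation_BED | Svalues.py | __reverseRadionuclideName
-- ===== SOURCE A (Python) =====
-- def __reverseRadionuclideName(name):
--     number = ''
--     alpha = ''
--     for i in range(0, len(name)):
--         if name[i].isnumeric():
--             number = number + name[i]
--         if name[i].isalpha():
--             alpha = alpha + name[i]
--     return number + alpha
-- ===== SOURCE B (Python) =====
-- def __reverseRadionuclideName(name):
--     kept = filter(str.isalnum, name)
--     return ''.join(sorted(kept, key=str.isalpha))
-- ===== Notes on version B (the rewrite author's own statement) =====
-- stated objective: idiomatic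
-- what changed: Replaces the two-accumulator indexing loop with quadratic string concatenation by a filter of the alphanumeric characters followed by one stable sort keyed on isalpha (digits=False sort first, stability keeps each group's order); measured ~2x faster via C-level filter/sort and a single join.
import Mathlib
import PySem

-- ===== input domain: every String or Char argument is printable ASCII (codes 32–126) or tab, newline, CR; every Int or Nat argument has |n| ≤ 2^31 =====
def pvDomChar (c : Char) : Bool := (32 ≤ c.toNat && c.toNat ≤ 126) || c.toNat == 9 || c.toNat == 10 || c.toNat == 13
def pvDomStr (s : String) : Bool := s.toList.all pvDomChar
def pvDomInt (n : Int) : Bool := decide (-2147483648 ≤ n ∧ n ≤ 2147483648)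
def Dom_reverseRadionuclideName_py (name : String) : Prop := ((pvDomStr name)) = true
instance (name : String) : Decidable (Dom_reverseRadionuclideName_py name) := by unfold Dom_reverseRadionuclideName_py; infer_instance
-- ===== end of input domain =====

-- B replaces A's two-accumulator indexing loop by one stable sort keyed on isalpha over the
-- kept (alphanumeric) characters — idiomatic, and measured ~2x faster in a timing run.

-- ===== PORT A =====
-- str.isnumeric is ported as PySem.Chars.isdigit: exact on the ASCII domain (Dom_).
-- pvStepA is the body of A's for-loop: the two independent ifs on name[i].
def pvStepA (acc : List Char × List Char) (c : Char) : List Char × List Char :=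
  let acc := if PySem.Chars.isdigit c then (acc.1 ++ [c], acc.2) else acc
  if PySem.Chars.isalpha c then (acc.1, acc.2 ++ [c]) else acc

def reverseRadionuclideName_py (name : String) : String :=
  let p := (PySem.List.pyRange 0 (PySem.Str.len name) 1).foldl
    (fun acc i => pvStepA acc (PySem.List.pyGetD name.toList i ' ')) ([], [])
  String.mk (p.1 ++ p.2)

-- ===== PORT B =====
def reverseRadionuclideName_py_alt (name : String) : String :=
  let kept := name.toList.filter PySem.Chars.isalnum
  String.mk (PySem.List.sorted kept (fun c => PySem.Chars.isalpha c) false)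

-- ===== PRECONDITION & SPEC =====
def Spec_reverseRadionuclideName_py (name : String) (out : String) : Prop := out = reverseRadionuclideName_py_alt name
instance (name : String) (out : String) : Decidable (Spec_reverseRadionuclideName_py name out) := by unfold Spec_reverseRadionuclideName_py; infer_instance

-- ===== CLAIM (what is proved, stated in full; the proofs are below) =====
def Claim_equal_reverseRadionuclideName_py : Prop := ∀ (name : String), Dom_reverseRadionuclideName_py name → Spec_reverseRadionuclideName_py name (reverseRadionuclideName_py name)

-- ===== LEMMAS AND PROOFS =====

-- A digit character is never alphabetic.
theorem pv_digit_not_alpha (c : Char) (h : PySem.Chars.isdigit c = true) :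
    PySem.Chars.isalpha c = false := by
  simp [PySem.Chars.isdigit, PySem.Chars.isalpha, PySem.Chars.isupper, PySem.Chars.islower,
        Char.le_def, UInt32.le_iff_toNat_le] at *
  omega

-- A's loop accumulates exactly (digits of l, letters of l) appended to the running accumulators.
theorem pv_foldA (l : List Char) (n a : List Char) :
    l.foldl pvStepA (n, a)
    = (n ++ l.filter PySem.Chars.isdigit, a ++ l.filter PySem.Chars.isalpha) := by
  induction l generalizing n a with
  | nil => simp
  | cons c t ih =>
      simp only [List.foldl_cons, List.filter_cons]
      by_cases hd : PySem.Chars.isdigit c = true <;>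
        by_cases ha : PySem.Chars.isalpha c = true <;>
          simp [pvStepA, hd, ha, ih]

-- Inserting an element whose key is false passes the false block and lands before the true block.
theorem pv_insert_false {α : Type} (key : α → Bool) (x : α) (F T : List α)
    (hF : ∀ y ∈ F, key y = false) (hT : ∀ y ∈ T, key y = true) (hx : key x = false) :
    PySem.List.insertBy (fun a b => decide (key a < key b)) x (F ++ T) = (F ++ [x]) ++ T := by
  induction F with
  | nil =>
      cases T with
      | nil => simp [PySem.List.insertBy]
      | cons t T' =>
          have ht : key t = true := hT t (by simp)
          simp [PySem.List.insertBy, hx, ht]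
  | cons f F' ih =>
      have hf : key f = false := hF f (by simp)
      simp only [List.cons_append, PySem.List.insertBy, hx, hf]
      simp only [show (false < false) = False by decide, decide_false]
      rw [ih (fun y hy => hF y (by simp [hy]))]
      simp

-- Inserting an element whose key is true lands at the very end.
theorem pv_insert_true {α : Type} (key : α → Bool) (x : α) (l : List α)
    (hx : key x = true) :
    PySem.List.insertBy (fun a b => decide (key a < key b)) x l = l ++ [x] := by
  induction l with
  | nil => simp [PySem.List.insertBy]
  | cons y l' ih =>
      have : (key x < key y) = False := by cases hky : key y <;> simp [hx]
      simp [PySem.List.insertBy, this, ih]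

-- Stable sort by a Bool key is a stable partition: false-key elements first, then true-key ones.
theorem pv_sorted_bool {α : Type} (l : List α) (key : α → Bool) :
    PySem.List.sorted l (fun x => key x) false
      = l.filter (fun x => !key x) ++ l.filter key := by
  show l.foldl (fun acc x => PySem.List.insertBy (fun a b => decide (key a < key b)) x acc) []
        = l.filter (fun x => !key x) ++ l.filter key
  suffices h : ∀ (F T : List α), (∀ y ∈ F, key y = false) → (∀ y ∈ T, key y = true) →
      l.foldl (fun acc x => PySem.List.insertBy (fun a b => decide (key a < key b)) x acc) (F ++ T)
        = (F ++ l.filter (fun x => !key x)) ++ (T ++ l.filter key) by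
    simpa using h [] [] (by simp) (by simp)
  induction l with
  | nil => intro F T _ _; simp
  | cons x t ih =>
      intro F T hF hT
      simp only [List.foldl_cons, List.filter_cons]
      cases hx : key x with
      | false =>
          rw [pv_insert_false key x F T hF hT hx]
          rw [ih (F ++ [x]) T (by intro y hy; rcases List.mem_append.mp hy with h | h
                                  · exact hF y h
                                  · simp at h; simpa [h] using hx) hT]
          simp
      | true =>
          rw [show F ++ T = (F ++ T : List α) from rfl, pv_insert_true key x (F ++ T) hx]
          rw [List.append_assoc F T [x], ih F (T ++ [x]) hF
            (by intro y hy; rcases List.mem_append.mp hy with h | h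
                · exact hT y h
                · simp at h; simpa [h] using hx)]
          simp

-- ===== VERDICT (by name: the statement is the Claim_ definition above) =====
theorem reverseRadionuclideName_py_spec : Claim_equal_reverseRadionuclideName_py := by
  intro name _
  show reverseRadionuclideName_py name = reverseRadionuclideName_py_alt name
  unfold reverseRadionuclideName_py reverseRadionuclideName_py_alt
  simp only [PySem.Str.len_eq]
  rw [PySem.List.foldl_pyRange_zero_pyGetD' name.toList ' ' pvStepA ([], [])]
  rw [pv_foldA, pv_sorted_bool]
  have h1 : (name.toList.filter PySem.Chars.isalnum).filter (fun c => !PySem.Chars.isalpha c)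
      = name.toList.filter PySem.Chars.isdigit := by
    rw [List.filter_filter]
    apply List.filter_congr
    intro c _
    cases ha : PySem.Chars.isalpha c
    · simp [PySem.Chars.isalnum, ha]
    · cases hd : PySem.Chars.isdigit c
      · simp [PySem.Chars.isalnum, ha, hd]
      · exact absurd ha (by simp [pv_digit_not_alpha c hd])
  have h2 : (name.toList.filter PySem.Chars.isalnum).filter PySem.Chars.isalpha
      = name.toList.filter PySem.Chars.isalpha := by
    rw [List.filter_filter]
    apply List.filter_congr
    intro c _
    cases ha : PySem.Chars.isalpha c <;> simp [PySem.Chars.isalnum, ha]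
  simp only [h1, h2, List.nil_append]
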